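-- pv_equiv track=rewrite | github.com/cbsharp100/ncaab-betting-model | api/main.py | find_team_name
-- ===== SOURCE A (Python) =====
-- def find_team_name(user_input: str, team_list: list[str]) -> str:
--     s = user_input.lower().strip()
--
--     # exact match first
--     for t in team_list:
--         if t.lower() == s:
--             return t
--
--     # partial match
--     matches = [t for t in team_list if s in t.lower()]
--     if len(matches) == 1:
--         return matches[0]
--     if len(matches) > 1:
--         # deterministic: pick shortest match (usually the “main” name)
--         matches.sort(key=len)
--         return matches[0]
--
--     raise ValueError(f"No team found matching '{user_input}'")
-- ===== SOURCE B (Python) =====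
-- def find_team_name(user_input: str, team_list: list[str]) -> str:
--     s = user_input.lower().strip()
--     best = None  # shortest substring match seen so far (first one wins ties)
--     for t in team_list:
--         tl = t.lower()
--         if tl == s:
--             return t
--         if s in tl and (best is None or len(t) < len(best)):
--             best = t
--     if best is None:
--         raise ValueError(f"No team found matching '{user_input}'")
--     return best
-- ===== Notes on version B (the rewrite author's own statement) =====
-- stated objective: simpler
-- what changed: Fuses A's two passes (exact-match loop, then substring comprehension plus a stable sort by length) into one pass that returns immediately on an exact match and otherwise keeps only the running first-shortest substring match, so no match list and no sort are ever built; Pre_ excludes only the inputs where A (and B) raise ValueError because no team matches.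
import Mathlib
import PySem

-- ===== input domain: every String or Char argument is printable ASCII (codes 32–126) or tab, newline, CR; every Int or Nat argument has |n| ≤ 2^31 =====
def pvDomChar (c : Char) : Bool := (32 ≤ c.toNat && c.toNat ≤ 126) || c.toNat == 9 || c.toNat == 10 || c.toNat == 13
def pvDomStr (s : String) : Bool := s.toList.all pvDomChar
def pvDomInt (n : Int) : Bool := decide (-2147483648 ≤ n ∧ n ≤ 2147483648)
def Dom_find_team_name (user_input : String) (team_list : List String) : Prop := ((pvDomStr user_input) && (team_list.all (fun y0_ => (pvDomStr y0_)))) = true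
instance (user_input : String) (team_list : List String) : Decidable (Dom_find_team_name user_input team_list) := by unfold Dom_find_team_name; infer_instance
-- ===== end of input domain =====

-- B fuses A's two passes (exact loop, then substring filter + stable sort by length) into one
-- pass keeping the running first-shortest substring match; the return value is unchanged.


-- ===== PORT A =====
-- A's first loop: return the first t with t.lower() == s
def pvExactA (s : String) : List String → Option String
  | [] => none
  | t :: ts => if PySem.Str.lower t == s then some t else pvExactA s ts

def find_team_name (user_input : String) (team_list : List String) : String :=
  let s := PySem.Str.strip (PySem.Str.lower user_input)
  match pvExactA s team_list with
  | some t => t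
  | none =>
    let matchesL := team_list.filter (fun t => PySem.Str.isIn s (PySem.Str.lower t))
    if matchesL.length == 1 then matchesL.headD ""
    else if matchesL.length > 1 then
      (PySem.List.sorted matchesL (fun t => PySem.Str.len t) false).headD ""
    else ""  -- Python raises ValueError here; excluded by Pre_find_team_name

-- ===== PORT B =====
-- B's single loop: early return on exact match, else keep the running first-shortest substring match
def pvGoB (s : String) (best : Option String) : List String → Option String
  | [] => best
  | t :: ts =>
    let tl := PySem.Str.lower t
    if tl == s then some t
    else if PySem.Str.isIn s tl &&
            (match best with
             | none => true
             | some b => decide (PySem.Str.len t < PySem.Str.len b)) then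
      pvGoB s (some t) ts
    else pvGoB s best ts

def find_team_name_alt (user_input : String) (team_list : List String) : String :=
  let s := PySem.Str.strip (PySem.Str.lower user_input)
  match pvGoB s none team_list with
  | some b => b
  | none => ""  -- Python raises ValueError here; excluded by Pre_find_team_name

-- ===== PRECONDITION & SPEC =====
-- Pre_ excludes exactly the inputs on which A raises ValueError: no team whose lowercased
-- name contains the lowercased+stripped input (an exact match is such a containment).
def Pre_find_team_name (user_input : String) (team_list : List String) : Prop :=
  ∃ t ∈ team_list,
    PySem.Str.isIn (PySem.Str.strip (PySem.Str.lower user_input)) (PySem.Str.lower t) = true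

instance (user_input : String) (team_list : List String) : Decidable (Pre_find_team_name user_input team_list) := by
  unfold Pre_find_team_name; infer_instance

def pvWitness_find_team_name : String × List String := ("duke ", ["Duke", "Kansas"])

def Spec_find_team_name (user_input : String) (team_list : List String) (out : String) : Prop := out = find_team_name_alt user_input team_list
instance (user_input : String) (team_list : List String) (out : String) : Decidable (Spec_find_team_name user_input team_list out) := by unfold Spec_find_team_name; infer_instance

-- ===== CLAIM (what is proved, stated in full; the proofs are below) =====
def Claim_equal_find_team_name : Prop := ∀ (user_input : String) (team_list : List String), Dom_find_team_name user_input team_list → Pre_find_team_name user_input team_list → Spec_find_team_name user_input team_list (find_team_name user_input team_list)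

-- ===== LEMMAS AND PROOFS =====

-- the first-strict-min step used by PySem.List.min? (and by B's running best)
def pvMinStep (key : String → Int) (acc : Option String) (x : String) : Option String :=
  match acc with
  | none => some x
  | some m => if key x < key m then some x else some m

lemma pvGoB_spec (s : String) :
    ∀ (l : List String) (best : Option String),
      pvGoB s best l =
        match pvExactA s l with
        | some t => some t
        | none =>
          l.foldl
            (fun acc x =>
              if PySem.Str.isIn s (PySem.Str.lower x) then
                pvMinStep (fun t => PySem.Str.len t) acc x
              else acc)
            best := by
  intro l
  induction l with
  | nil => intro best; rfl
  | cons t ts ih =>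
    intro best
    by_cases he : PySem.Str.lower t == s
    · simp only [pvGoB, pvExactA, he, if_true]
    · have hupd :
        (if PySem.Str.isIn s (PySem.Str.lower t) &&
              (match best with
               | none => true
               | some b => decide (PySem.Str.len t < PySem.Str.len b)) then
           pvGoB s (some t) ts
         else pvGoB s best ts) =
        pvGoB s
          (if PySem.Str.isIn s (PySem.Str.lower t) then
             pvMinStep (fun x => PySem.Str.len x) best t
           else best) ts := by
        by_cases hp : PySem.Str.isIn s (PySem.Str.lower t)
        · cases best with
          | none =>
            simp only [hp, Bool.true_and, if_true, pvMinStep]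
          | some b =>
            by_cases hlt : PySem.Str.len t < PySem.Str.len b
            · simp only [hp, Bool.true_and, hlt, decide_true, if_true, pvMinStep]
            · simp only [hp, Bool.true_and, hlt, decide_false, Bool.false_eq_true, if_false,
                pvMinStep]
              simp
        · simp only [Bool.not_eq_true] at hp
          simp only [hp, Bool.false_and, Bool.false_eq_true, if_false]
      simp only [pvGoB, he, Bool.false_eq_true, if_false]
      rw [hupd, ih]
      simp only [pvExactA, he, Bool.false_eq_true, if_false, List.foldl_cons]

lemma min?_eq_foldl_minStep (key : String → Int) (xs : List String) :
    PySem.List.min? xs key = xs.foldl (pvMinStep key) none := by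
  unfold PySem.List.min?
  congr 1
  funext o x
  cases o <;> simp [pvMinStep]

lemma head?_foldl_insertBy (key : String → Int) :
    ∀ (l : List String) (acc : List String),
      (l.foldl (fun a x => PySem.List.insertBy (fun a b => decide (key a < key b)) x a) acc).head? =
        l.foldl (pvMinStep key) acc.head? := by
  intro l
  induction l with
  | nil => intro acc; rfl
  | cons x xs ih =>
    intro acc
    simp only [List.foldl_cons]
    rw [ih]
    congr 1
    cases acc with
    | nil => rfl
    | cons y ys =>
      by_cases h : key x < key y
      · simp [PySem.List.insertBy, h, pvMinStep]
      · simp [PySem.List.insertBy, h, pvMinStep]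

lemma head?_sorted_eq_min? (key : String → Int) (xs : List String) :
    (PySem.List.sorted xs key false).head? = PySem.List.min? xs key := by
  rw [PySem.List.sorted_eq_foldl_insertBy, head?_foldl_insertBy]
  simp only [List.head?_nil]
  rw [min?_eq_foldl_minStep]

-- ===== VERDICT (by name: the statement is the Claim_ definition above) =====
theorem find_team_name_spec : Claim_equal_find_team_name := by
  intro user_input team_list _hdom hpre
  unfold Spec_find_team_name find_team_name find_team_name_alt
  dsimp only
  set s := PySem.Str.strip (PySem.Str.lower user_input) with hs
  rw [pvGoB_spec]
  cases hex : pvExactA s team_list with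
  | some t => simp
  | none =>
    simp only []
    set p : String → Bool := fun t => PySem.Str.isIn s (PySem.Str.lower t) with hp
    rw [PySem.List.foldl_if_eq_foldl_filter, ← min?_eq_foldl_minStep]
    set ms := team_list.filter p with hm
    have hne : ms ≠ [] := by
      obtain ⟨t, ht, hin⟩ := hpre
      intro hnil
      have : t ∈ ms := by
        rw [hm]; exact List.mem_filter.mpr ⟨ht, by simpa [hp, hs] using hin⟩
      simp [hnil] at this
    cases hminv : PySem.List.min? ms (fun t => PySem.Str.len t) with
    | none => exact absurd ((PySem.List.min?_eq_none_iff ms (fun t => PySem.Str.len t)).mp hminv) hne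
    | some b =>
      by_cases h1 : ms.length == 1
      · obtain ⟨m, hm1⟩ : ∃ m, ms = [m] := by
          cases hmm : ms with
          | nil => rw [hmm] at h1; simp at h1
          | cons a t =>
            cases t with
            | nil => exact ⟨a, rfl⟩
            | cons c d => rw [hmm] at h1; simp at h1
        rw [hm1] at hminv
        have hb : b = m := by
          rw [min?_eq_foldl_minStep] at hminv
          simpa [pvMinStep] using hminv.symm
        simp [hm1, hb]
      · have hgt : ms.length > 1 := by
          have := List.length_pos_iff.mpr hne
          simp only [beq_iff_eq] at h1
          omega
        have hhead : (PySem.List.sorted ms (fun t => PySem.Str.len t) false).head? = some b := by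
          rw [head?_sorted_eq_min?]; exact hminv
        simp only [h1, Bool.false_eq_true, if_false, hgt, if_true]
        rw [List.headD_eq_head?_getD, hhead]
        rfl
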